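-- pv_equiv track=rewrite | github.com/pdynamo/pDynamo3 | pBabel/CHARMMParameterFileReader.py | IdentifySection
-- ===== SOURCE A (Python) =====
-- _SectionMapping = { "ANGL" : "Angle"   , "ATOM" : "Atom" , "BOND" : "Bond"   , "CMAP" : "CMap"   , "DIHE" : "Dihedral", "END"  : "End"  , "EQUI" : "Equivalence", "HBON" : "HBond", "IMPH" : "Improper", \
--                     "IMPR" : "Improper", "NBFI" : "NBFix", "NBON" : "NonBond", "NONB" : "NonBond", "PHI"  : "Dihedral", "PRIN" : "Print", "SPAS" : "SPAS" , "THET" : "Dihedral"  }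
--
-- _SectionNames = ( "ANGL", "ATOM", "BOND", "CMAP", "DIHE", "END", "EQUI", "HBON", "IMPH", "IMPR", "NBFI", "NBON", "NONB", "PHI", "PRIN", "SPAS", "THET" )
--
-- def IdentifySection ( line ):
--     """Identify a section of the parameter file."""
--     section = None
--     if line.startswith ( "*" ):
--         section = "Title"
--         line    = line[1:].strip ( )
--     else:
--         tokens = line.split ( " ", 1 )
--         head   = tokens[0].upper ( )
--         for name in _SectionNames:
--             if head.startswith ( name ):
--                 section = _SectionMapping[name]
--                 if len ( tokens ) == 1: line = ""
--                 else:                   line = tokens[1]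
--                 break
--     return ( section, line )
-- ===== SOURCE B (Python) =====
-- _SectionMapping = { "ANGL" : "Angle"   , "ATOM" : "Atom" , "BOND" : "Bond"   , "CMAP" : "CMap"   , "DIHE" : "Dihedral", "END"  : "End"  , "EQUI" : "Equivalence", "HBON" : "HBond", "IMPH" : "Improper", \
--                     "IMPR" : "Improper", "NBFI" : "NBFix", "NBON" : "NonBond", "NONB" : "NonBond", "PHI"  : "Dihedral", "PRIN" : "Print", "SPAS" : "SPAS" , "THET" : "Dihedral"  }
--
-- def IdentifySection ( line ):
--     """Identify a section of the parameter file."""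
--     if line.startswith ( "*" ):
--         return ( "Title", line[1:].strip ( ) )
--     head, _, rest = line.partition ( " " )
--     head = head.upper ( )
--     # every section key has length 4 or 3, so prefix matching reduces to two dict probes
--     section = _SectionMapping.get ( head[:4] ) or _SectionMapping.get ( head[:3] )
--     return ( section, line if section is None else rest )
-- ===== Notes on version B (the rewrite author's own statement) =====
-- stated objective: simpler
-- what changed: A's scan over 17 section names with head.startswith is replaced by str.partition on the first space plus two constant-time dict probes on head[:4] and head[:3] (every key has length 4 or 3), so both the name loop and the split list disappear.
import Mathlib
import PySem

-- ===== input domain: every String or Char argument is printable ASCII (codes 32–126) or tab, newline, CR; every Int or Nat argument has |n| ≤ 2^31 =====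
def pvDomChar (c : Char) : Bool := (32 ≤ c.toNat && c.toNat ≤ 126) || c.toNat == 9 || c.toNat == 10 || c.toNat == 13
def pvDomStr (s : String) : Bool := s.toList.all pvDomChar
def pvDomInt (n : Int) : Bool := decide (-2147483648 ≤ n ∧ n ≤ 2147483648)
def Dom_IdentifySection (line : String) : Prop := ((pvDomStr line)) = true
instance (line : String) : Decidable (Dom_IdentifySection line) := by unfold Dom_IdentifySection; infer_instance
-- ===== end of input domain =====

-- B replaces A's split(" ",1) + scan over the 17 section names by str.partition on the
-- first space and two constant-time dict probes (every key has length 4 or 3); simpler.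

-- ===== PORT A =====
-- _SectionMapping (keys as code-point lists; all keys and values are ASCII)
def pvSectionMapping : PySem.Dict (List Char) String :=
  PySem.Dict.mk
    [ (['A','N','G','L'], "Angle"),    (['A','T','O','M'], "Atom"),
      (['B','O','N','D'], "Bond"),     (['C','M','A','P'], "CMap"),
      (['D','I','H','E'], "Dihedral"), (['E','N','D'],      "End"),
      (['E','Q','U','I'], "Equivalence"), (['H','B','O','N'], "HBond"),
      (['I','M','P','H'], "Improper"), (['I','M','P','R'], "Improper"),
      (['N','B','F','I'], "NBFix"),    (['N','B','O','N'], "NonBond"),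
      (['N','O','N','B'], "NonBond"),  (['P','H','I'],      "Dihedral"),
      (['P','R','I','N'], "Print"),    (['S','P','A','S'], "SPAS"),
      (['T','H','E','T'], "Dihedral") ]

-- _SectionNames
def pvSectionNames : List (List Char) :=
  [ ['A','N','G','L'], ['A','T','O','M'], ['B','O','N','D'], ['C','M','A','P'],
    ['D','I','H','E'], ['E','N','D'], ['E','Q','U','I'], ['H','B','O','N'],
    ['I','M','P','H'], ['I','M','P','R'], ['N','B','F','I'], ['N','B','O','N'],
    ['N','O','N','B'], ['P','H','I'], ['P','R','I','N'], ['S','P','A','S'],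
    ['T','H','E','T'] ]

-- the 'for name in _SectionNames' loop with its break; on a hit the body reads
-- _SectionMapping[name] (key always present: getD is exact) and tokens[1] (guarded by
-- the len(tokens)==1 test, so pyGet?.getD is exact)
def pvGo (head : List Char) (tokens : List String) (line : String) :
    List (List Char) → Option String × String
  | [] => (none, line)
  | n :: rest =>
      if PySem.Chars.startswith head n then
        (some (pvSectionMapping.getD n ""),
         if tokens.length == 1 then "" else (PySem.List.pyGet? tokens 1).getD "")
      else pvGo head tokens line rest

def IdentifySection (line : String) : Option String × String :=
  if PySem.Str.startswith line "*" then
    (some "Title", PySem.Str.strip (PySem.Str.slice line (some 1) none))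
  else
    -- sep " " is nonempty, so splitMax? is always some (the getD never fires),
    -- and the split is never empty, so tokens[0] is headD
    let tokens := (PySem.Str.splitMax? line " " 1).getD []
    let head := PySem.Chars.upper (tokens.headD "").toList
    pvGo head tokens line pvSectionNames

-- ===== PORT B =====
-- head, _, rest = line.partition(" "): everything before the first ' ' and everything
-- after it (rest = "" when there is no space) — hand-ported, exact by construction
def pvPartition : List Char → List Char × List Char
  | [] => ([], [])
  | c :: t =>
      if c = ' ' then ([], t)
      else
        let p := pvPartition t
        (c :: p.1, p.2)

def IdentifySection_alt (line : String) : Option String × String :=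
  if PySem.Str.startswith line "*" then
    (some "Title", PySem.Str.strip (PySem.Str.slice line (some 1) none))
  else
    let p := pvPartition line.toList
    let head := PySem.Chars.upper p.1
    -- head[:4] / head[:3] are nonnegative slices = take;
    -- Python's 'get(…) or get(…)' is Option.orElse here (all dict values are nonempty strings)
    match (pvSectionMapping.get? (head.take 4)).orElse
          (fun _ => pvSectionMapping.get? (head.take 3)) with
    | none => (none, line)
    | some s => (some s, String.ofList p.2)

-- ===== PRECONDITION & SPEC =====
def Spec_IdentifySection (line : String) (out : Option String × String) : Prop := out = IdentifySection_alt line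
instance (line : String) (out : Option String × String) : Decidable (Spec_IdentifySection line out) := by unfold Spec_IdentifySection; infer_instance

-- ===== CLAIM (what is proved, stated in full; the proofs are below) =====
def Claim_equal_IdentifySection : Prop := ∀ (line : String), Dom_IdentifySection line → Spec_IdentifySection line (IdentifySection line)

-- ===== LEMMAS AND PROOFS =====

-- A's name scan, expressed through the two prefix probes (proof-side helper)
def pvProbe (head : List Char) (tokens : List String) (line : String) :
    Option String × String :=
  let key := if pvSectionMapping.contains (head.take 4)
             then head.take 4 else head.take 3
  if pvSectionMapping.contains key then
    (some (pvSectionMapping.getD key ""),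
     if tokens.length == 1 then "" else (PySem.List.pyGet? tokens 1).getD "")
  else (none, line)

-- heads of length ≥ 4: the name scan = the two prefix probes
set_option maxHeartbeats 1000000 in
theorem pvCore4 (a b c d : Char) (t : List Char) (tokens : List String) (line : String) :
    pvGo (a::b::c::d::t) tokens line pvSectionNames = pvProbe (a::b::c::d::t) tokens line := by
  have s4 : (a::b::c::d::t).take 4 = [a,b,c,d] := by simp
  have s3 : (a::b::c::d::t).take 3 = [a,b,c] := by simp
  simp only [pvGo, pvProbe, pvSectionNames, s4, s3]
  by_cases h1 : PySem.Chars.startswith (a::b::c::d::t) ['A','N','G','L'] = true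
  · rw [if_pos h1]
    simp [PySem.Chars.startswith, List.isPrefixOf] at h1
    obtain ⟨rfl, rfl, rfl, rfl⟩ := h1
    simp [pvSectionMapping]
  rw [if_neg h1]
  by_cases h2 : PySem.Chars.startswith (a::b::c::d::t) ['A','T','O','M'] = true
  · rw [if_pos h2]
    simp [PySem.Chars.startswith, List.isPrefixOf] at h2
    obtain ⟨rfl, rfl, rfl, rfl⟩ := h2
    simp [pvSectionMapping]
  rw [if_neg h2]
  by_cases h3 : PySem.Chars.startswith (a::b::c::d::t) ['B','O','N','D'] = true
  · rw [if_pos h3]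
    simp [PySem.Chars.startswith, List.isPrefixOf] at h3
    obtain ⟨rfl, rfl, rfl, rfl⟩ := h3
    simp [pvSectionMapping]
  rw [if_neg h3]
  by_cases h4 : PySem.Chars.startswith (a::b::c::d::t) ['C','M','A','P'] = true
  · rw [if_pos h4]
    simp [PySem.Chars.startswith, List.isPrefixOf] at h4
    obtain ⟨rfl, rfl, rfl, rfl⟩ := h4
    simp [pvSectionMapping]
  rw [if_neg h4]
  by_cases h5 : PySem.Chars.startswith (a::b::c::d::t) ['D','I','H','E'] = true
  · rw [if_pos h5]
    simp [PySem.Chars.startswith, List.isPrefixOf] at h5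
    obtain ⟨rfl, rfl, rfl, rfl⟩ := h5
    simp [pvSectionMapping]
  rw [if_neg h5]
  by_cases h6 : PySem.Chars.startswith (a::b::c::d::t) ['E','N','D'] = true
  · rw [if_pos h6]
    simp [PySem.Chars.startswith, List.isPrefixOf] at h6
    obtain ⟨rfl, rfl, rfl⟩ := h6
    simp [pvSectionMapping]
  rw [if_neg h6]
  by_cases h7 : PySem.Chars.startswith (a::b::c::d::t) ['E','Q','U','I'] = true
  · rw [if_pos h7]
    simp [PySem.Chars.startswith, List.isPrefixOf] at h7
    obtain ⟨rfl, rfl, rfl, rfl⟩ := h7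
    simp [pvSectionMapping]
  rw [if_neg h7]
  by_cases h8 : PySem.Chars.startswith (a::b::c::d::t) ['H','B','O','N'] = true
  · rw [if_pos h8]
    simp [PySem.Chars.startswith, List.isPrefixOf] at h8
    obtain ⟨rfl, rfl, rfl, rfl⟩ := h8
    simp [pvSectionMapping]
  rw [if_neg h8]
  by_cases h9 : PySem.Chars.startswith (a::b::c::d::t) ['I','M','P','H'] = true
  · rw [if_pos h9]
    simp [PySem.Chars.startswith, List.isPrefixOf] at h9
    obtain ⟨rfl, rfl, rfl, rfl⟩ := h9
    simp [pvSectionMapping]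
  rw [if_neg h9]
  by_cases h10 : PySem.Chars.startswith (a::b::c::d::t) ['I','M','P','R'] = true
  · rw [if_pos h10]
    simp [PySem.Chars.startswith, List.isPrefixOf] at h10
    obtain ⟨rfl, rfl, rfl, rfl⟩ := h10
    simp [pvSectionMapping]
  rw [if_neg h10]
  by_cases h11 : PySem.Chars.startswith (a::b::c::d::t) ['N','B','F','I'] = true
  · rw [if_pos h11]
    simp [PySem.Chars.startswith, List.isPrefixOf] at h11
    obtain ⟨rfl, rfl, rfl, rfl⟩ := h11
    simp [pvSectionMapping]
  rw [if_neg h11]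
  by_cases h12 : PySem.Chars.startswith (a::b::c::d::t) ['N','B','O','N'] = true
  · rw [if_pos h12]
    simp [PySem.Chars.startswith, List.isPrefixOf] at h12
    obtain ⟨rfl, rfl, rfl, rfl⟩ := h12
    simp [pvSectionMapping]
  rw [if_neg h12]
  by_cases h13 : PySem.Chars.startswith (a::b::c::d::t) ['N','O','N','B'] = true
  · rw [if_pos h13]
    simp [PySem.Chars.startswith, List.isPrefixOf] at h13
    obtain ⟨rfl, rfl, rfl, rfl⟩ := h13
    simp [pvSectionMapping]
  rw [if_neg h13]
  by_cases h14 : PySem.Chars.startswith (a::b::c::d::t) ['P','H','I'] = true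
  · rw [if_pos h14]
    simp [PySem.Chars.startswith, List.isPrefixOf] at h14
    obtain ⟨rfl, rfl, rfl⟩ := h14
    simp [pvSectionMapping]
  rw [if_neg h14]
  by_cases h15 : PySem.Chars.startswith (a::b::c::d::t) ['P','R','I','N'] = true
  · rw [if_pos h15]
    simp [PySem.Chars.startswith, List.isPrefixOf] at h15
    obtain ⟨rfl, rfl, rfl, rfl⟩ := h15
    simp [pvSectionMapping]
  rw [if_neg h15]
  by_cases h16 : PySem.Chars.startswith (a::b::c::d::t) ['S','P','A','S'] = true
  · rw [if_pos h16]
    simp [PySem.Chars.startswith, List.isPrefixOf] at h16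
    obtain ⟨rfl, rfl, rfl, rfl⟩ := h16
    simp [pvSectionMapping]
  rw [if_neg h16]
  by_cases h17 : PySem.Chars.startswith (a::b::c::d::t) ['T','H','E','T'] = true
  · rw [if_pos h17]
    simp [PySem.Chars.startswith, List.isPrefixOf] at h17
    obtain ⟨rfl, rfl, rfl, rfl⟩ := h17
    simp [pvSectionMapping]
  rw [if_neg h17]
  simp [PySem.Chars.startswith, List.isPrefixOf] at h1 h2 h3 h4 h5 h6 h7 h8 h9 h10 h11 h12 h13 h14 h15 h16 h17
  have c4 : pvSectionMapping.contains [a,b,c,d] = false := by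
    simp [pvSectionMapping]
    exact ⟨h1, h2, h3, h4, h5, h7, h8, h9, h10, h11, h12, h13, h15, h16, h17⟩
  have c3 : pvSectionMapping.contains [a,b,c] = false := by
    simp [pvSectionMapping]
    exact ⟨h6, h14⟩
  simp [c4, c3]

-- the name scan = the two prefix probes, for every head
set_option maxHeartbeats 1000000 in
theorem pvCore (head : List Char) (tokens : List String) (line : String) :
    pvGo head tokens line pvSectionNames = pvProbe head tokens line := by
  obtain _ | ⟨a, _ | ⟨b, _ | ⟨c, _ | ⟨d, t⟩⟩⟩⟩ := head
  · have cn : pvSectionMapping.contains [] = false := by decide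
    simp [pvGo, pvSectionNames, pvProbe, PySem.Chars.startswith, List.isPrefixOf, cn]
  · have cn : pvSectionMapping.contains [a] = false := by simp [pvSectionMapping]
    simp [pvGo, pvSectionNames, pvProbe, PySem.Chars.startswith, List.isPrefixOf, cn]
  · have cn : pvSectionMapping.contains [a, b] = false := by simp [pvSectionMapping]
    simp [pvGo, pvSectionNames, pvProbe, PySem.Chars.startswith, List.isPrefixOf, cn]
  · -- length-3 heads: only the keys "END" and "PHI" can still match
    have s4 : ([a, b, c] : List Char).take 4 = [a, b, c] := by simp
    have s3 : ([a, b, c] : List Char).take 3 = [a, b, c] := by simp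
    simp only [pvGo, pvProbe, pvSectionNames, s4, s3]
    by_cases h1 : PySem.Chars.startswith [a, b, c] ['A','N','G','L'] = true
    · simp [PySem.Chars.startswith, List.isPrefixOf] at h1
    rw [if_neg h1]
    by_cases h2 : PySem.Chars.startswith [a, b, c] ['A','T','O','M'] = true
    · simp [PySem.Chars.startswith, List.isPrefixOf] at h2
    rw [if_neg h2]
    by_cases h3 : PySem.Chars.startswith [a, b, c] ['B','O','N','D'] = true
    · simp [PySem.Chars.startswith, List.isPrefixOf] at h3
    rw [if_neg h3]
    by_cases h4 : PySem.Chars.startswith [a, b, c] ['C','M','A','P'] = true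
    · simp [PySem.Chars.startswith, List.isPrefixOf] at h4
    rw [if_neg h4]
    by_cases h5 : PySem.Chars.startswith [a, b, c] ['D','I','H','E'] = true
    · simp [PySem.Chars.startswith, List.isPrefixOf] at h5
    rw [if_neg h5]
    by_cases h6 : PySem.Chars.startswith [a, b, c] ['E','N','D'] = true
    · rw [if_pos h6]
      simp [PySem.Chars.startswith, List.isPrefixOf] at h6
      obtain ⟨rfl, rfl, rfl⟩ := h6
      simp [pvSectionMapping]
    rw [if_neg h6]
    by_cases h7 : PySem.Chars.startswith [a, b, c] ['E','Q','U','I'] = true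
    · simp [PySem.Chars.startswith, List.isPrefixOf] at h7
    rw [if_neg h7]
    by_cases h8 : PySem.Chars.startswith [a, b, c] ['H','B','O','N'] = true
    · simp [PySem.Chars.startswith, List.isPrefixOf] at h8
    rw [if_neg h8]
    by_cases h9 : PySem.Chars.startswith [a, b, c] ['I','M','P','H'] = true
    · simp [PySem.Chars.startswith, List.isPrefixOf] at h9
    rw [if_neg h9]
    by_cases h10 : PySem.Chars.startswith [a, b, c] ['I','M','P','R'] = true
    · simp [PySem.Chars.startswith, List.isPrefixOf] at h10
    rw [if_neg h10]
    by_cases h11 : PySem.Chars.startswith [a, b, c] ['N','B','F','I'] = true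
    · simp [PySem.Chars.startswith, List.isPrefixOf] at h11
    rw [if_neg h11]
    by_cases h12 : PySem.Chars.startswith [a, b, c] ['N','B','O','N'] = true
    · simp [PySem.Chars.startswith, List.isPrefixOf] at h12
    rw [if_neg h12]
    by_cases h13 : PySem.Chars.startswith [a, b, c] ['N','O','N','B'] = true
    · simp [PySem.Chars.startswith, List.isPrefixOf] at h13
    rw [if_neg h13]
    by_cases h14 : PySem.Chars.startswith [a, b, c] ['P','H','I'] = true
    · rw [if_pos h14]
      simp [PySem.Chars.startswith, List.isPrefixOf] at h14
      obtain ⟨rfl, rfl, rfl⟩ := h14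
      simp [pvSectionMapping]
    rw [if_neg h14]
    by_cases h15 : PySem.Chars.startswith [a, b, c] ['P','R','I','N'] = true
    · simp [PySem.Chars.startswith, List.isPrefixOf] at h15
    rw [if_neg h15]
    by_cases h16 : PySem.Chars.startswith [a, b, c] ['S','P','A','S'] = true
    · simp [PySem.Chars.startswith, List.isPrefixOf] at h16
    rw [if_neg h16]
    by_cases h17 : PySem.Chars.startswith [a, b, c] ['T','H','E','T'] = true
    · simp [PySem.Chars.startswith, List.isPrefixOf] at h17
    rw [if_neg h17]
    simp [PySem.Chars.startswith, List.isPrefixOf] at h6 h14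
    have c3 : pvSectionMapping.contains [a, b, c] = false := by
      simp [pvSectionMapping]
      exact ⟨h6, h14⟩
    simp [c3]
  · exact pvCore4 a b c d t tokens line

-- the contains/getD form of the probes = B's get?/orElse form
theorem pvProbe_eq (head : List Char) (tokens : List String) (line : String) :
    pvProbe head tokens line =
      match (pvSectionMapping.get? (head.take 4)).orElse
            (fun _ => pvSectionMapping.get? (head.take 3)) with
      | none => (none, line)
      | some s => (some s, if tokens.length == 1 then ""
                           else (PySem.List.pyGet? tokens 1).getD "") := by
  unfold pvProbe
  rcases h4 : pvSectionMapping.get? (head.take 4) with _ | v4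
  · have c4 : pvSectionMapping.contains (head.take 4) = false := by
      rw [PySem.Dict.contains_eq_isSome_get?, h4]; rfl
    rcases h3 : pvSectionMapping.get? (head.take 3) with _ | v3
    · have c3 : pvSectionMapping.contains (head.take 3) = false := by
        rw [PySem.Dict.contains_eq_isSome_get?, h3]; rfl
      simp [c4, c3, Option.orElse]
    · have c3 : pvSectionMapping.contains (head.take 3) = true := by
        rw [PySem.Dict.contains_eq_isSome_get?, h3]; rfl
      simp [c4, c3, Option.orElse, PySem.Dict.getD_eq_get?_getD, h3]
  · have c4 : pvSectionMapping.contains (head.take 4) = true := by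
      rw [PySem.Dict.contains_eq_isSome_get?, h4]; rfl
    simp [c4, Option.orElse, PySem.Dict.getD_eq_get?_getD, h4]

-- the m = 0 tail of the split loop: everything left becomes the last piece
theorem pvGoZero (fuel : Nat) (l cur : List Char) (acc : List (List Char)) :
    PySem.Chars.splitOnMax.go [' '] fuel 0 l cur acc
      = ((cur.reverse ++ l) :: acc).reverse := by
  cases fuel with
  | zero => simp [PySem.Chars.splitOnMax.go]
  | succ f =>
    cases l with
    | nil => simp [PySem.Chars.splitOnMax.go]
    | cons c t => simp [PySem.Chars.splitOnMax.go]

-- the m = 1 split loop computes the partition at the first space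
theorem pvGoOne (l : List Char) : ∀ (fuel : Nat) (cur : List Char) (acc : List (List Char)),
    l.length < fuel →
    PySem.Chars.splitOnMax.go [' '] fuel 1 l cur acc =
      if ' ' ∈ l then
        acc.reverse ++ [cur.reverse ++ (pvPartition l).1, (pvPartition l).2]
      else acc.reverse ++ [cur.reverse ++ l] := by
  induction l with
  | nil =>
    intro fuel cur acc h
    cases fuel with
    | zero => omega
    | succ f => simp [PySem.Chars.splitOnMax.go]
  | cons c t ih =>
    intro fuel cur acc h
    cases fuel with
    | zero => omega
    | succ f =>
      by_cases hc : c = ' '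
      · subst hc
        have hp : ([' '] : List Char).isPrefixOf (' ' :: t) = true := by
          simp [List.isPrefixOf]
        simp [PySem.Chars.splitOnMax.go, hp, pvGoZero, pvPartition]
      · have hp : ([' '] : List Char).isPrefixOf (c :: t) = false := by
          simp only [List.isPrefixOf, Bool.and_true, beq_eq_false_iff_ne, ne_eq]
          exact fun h => hc h.symm
        have hf : t.length < f := by simpa using h
        rw [show PySem.Chars.splitOnMax.go [' '] (f+1) 1 (c :: t) cur acc
              = PySem.Chars.splitOnMax.go [' '] f 1 t (c :: cur) acc by
            simp [PySem.Chars.splitOnMax.go, hp], ih f (c :: cur) acc hf]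
        by_cases hm : ' ' ∈ t
        · have hm' : ' ' ∈ c :: t := List.mem_cons_of_mem _ hm
          simp [hm, hm', pvPartition, hc]
        · have hm' : ' ' ∉ c :: t := by
            intro hx
            rcases List.mem_cons.mp hx with hx | hx
            · exact hc hx.symm
            · exact hm hx
          simp [hm, hm']

-- A's tokens list, described through the partition
theorem pvSplit (line : String) :
    (PySem.Str.splitMax? line " " 1).getD [] =
      if ' ' ∈ line.toList then
        [String.ofList (pvPartition line.toList).1,
         String.ofList (pvPartition line.toList).2]
      else [line] := by
  have h1 : PySem.Str.splitMax? line " " 1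
      = some (List.map String.ofList (PySem.Chars.splitOnMax line.toList [' '] 1)) := by
    simp [PySem.Str.splitMax?, PySem.Chars.splitMax?]
  have h2 : PySem.Chars.splitOnMax line.toList [' '] 1
      = PySem.Chars.splitOnMax.go [' '] (line.toList.length + 1) 1 line.toList [] [] := by
    simp [PySem.Chars.splitOnMax]
  rw [h1, Option.getD_some, h2,
    pvGoOne line.toList (line.toList.length + 1) [] [] (by omega)]
  by_cases hm : ' ' ∈ line.toList
  · simp [hm]
  · simp [hm]

theorem pvPartition_no_space (l : List Char) (h : ' ' ∉ l) : pvPartition l = (l, []) := by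
  induction l with
  | nil => rfl
  | cons c t ih =>
    have hc : c ≠ ' ' := by intro hc; exact h (hc ▸ List.mem_cons_self)
    have ht : ' ' ∉ t := fun hm => h (List.mem_cons_of_mem _ hm)
    simp [pvPartition, hc, ih ht]

-- ===== VERDICT (by name: the statement is the Claim_ definition above) =====
theorem IdentifySection_spec : Claim_equal_IdentifySection := by
  intro line _
  unfold Spec_IdentifySection IdentifySection IdentifySection_alt
  by_cases h : PySem.Str.startswith line "*" = true
  · simp only [h, if_pos]
  · rw [if_neg h, if_neg h]
    rw [pvCore, pvProbe_eq, pvSplit]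
    by_cases hm : ' ' ∈ line.toList
    · simp only [hm, if_pos]
      simp [PySem.List.pyGet?, PySem.List.pyIdx?]
    · rw [if_neg hm]
      rw [pvPartition_no_space line.toList hm]
      simp
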